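-- pv_equiv track=rewrite | github.com/harasees-singh/Competitive_Programming | Practice_Problems_codechef/Sort_by_adjacent_swaps.py | InsertionSortCustom
-- ===== SOURCE A (Python) =====
-- def InsertionSortCustom(li):
--
--     swap_count = []
--     for j in range(len(li)):
--         key = li[j]
--         i = j
--         while i>=1 and key < li[i-1]:
--             li[i] = li[i-1]
--             swap_count.append(i-1)
--             i -= 1
--         li[i] = key
--     return swap_count
-- ===== SOURCE B (Python) =====
-- def InsertionSortCustom(li):
--     swap_count = []
--     for j in range(len(li)):
--         key = li[j]
--         lo, hi = 0, j
--         while lo < hi: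
--             mid = (lo + hi) // 2
--             if key < li[mid]:
--                 hi = mid
--             else:
--                 lo = mid + 1
--         pos = lo
--         swap_count.extend(range(j - 1, pos - 1, -1))
--         li[pos + 1:j + 1] = li[pos:j]
--         li[pos] = key
--     return swap_count
-- ===== Notes on version B (the rewrite author's own statement) =====
-- stated objective: faster
-- what changed: The linear backward shift-while inner loop is replaced by a binary search (bisect_right by hand) over the sorted prefix plus a bulk range-append of the swap indices and a single slice shift.
import Mathlib
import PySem

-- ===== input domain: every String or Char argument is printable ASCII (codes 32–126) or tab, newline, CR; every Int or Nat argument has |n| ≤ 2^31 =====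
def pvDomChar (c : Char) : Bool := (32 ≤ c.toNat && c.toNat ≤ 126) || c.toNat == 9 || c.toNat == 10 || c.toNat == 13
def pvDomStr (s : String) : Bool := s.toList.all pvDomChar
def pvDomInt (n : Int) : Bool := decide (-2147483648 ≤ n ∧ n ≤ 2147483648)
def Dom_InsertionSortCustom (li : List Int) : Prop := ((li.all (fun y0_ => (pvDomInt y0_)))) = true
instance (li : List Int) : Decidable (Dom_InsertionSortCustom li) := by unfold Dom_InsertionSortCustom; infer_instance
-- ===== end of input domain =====

-- B replaces A's element-at-a-time backward shift loop by a hand-written binary search over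
-- the sorted prefix plus one bulk range-append of swap indices and one slice shift.
-- Both A and B mutate the Python argument `li` in place (to the identical sorted state);
-- the equivalence proved here is about the RETURN value (the swap-index list).

-- ===== PORT A =====
-- inner `while i >= 1 and key < li[i-1]` loop of A (indices stay in range by the loop guard)
def aWhile (li : List Int) (sc : List Int) (key : Int) (i : Nat) :
    List Int × List Int × Nat :=
  if h : 1 ≤ i ∧ key < li.getD (i-1) 0 then
    aWhile (li.set i (li.getD (i-1) 0)) (sc ++ [((i : Int) - 1)]) key (i-1)
  else (li, sc, i)
termination_by i
decreasing_by omega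

-- one iteration of A's outer `for j in range(len(li))` loop
def aStep (st : List Int × List Int) (j : Nat) : List Int × List Int :=
  let key := st.1.getD j 0
  let r := aWhile st.1 st.2 key j
  (r.1.set r.2.2 key, r.2.1)

def InsertionSortCustom (li : List Int) : List Int :=
  ((List.range li.length).foldl aStep (li, [])).2

-- ===== PORT B =====
-- B's hand-written bisect_right: `while lo < hi: …`
def bsearch (li : List Int) (key : Int) (lo hi : Nat) : Nat :=
  if h : lo < hi then
    let mid := (lo + hi) / 2
    if key < li.getD mid 0 then bsearch li key lo mid else bsearch li key (mid+1) hi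
  else lo
termination_by hi - lo
decreasing_by all_goals omega

-- one iteration of B's outer loop: binary search, bulk range-append, slice shift
def bStep (st : List Int × List Int) (j : Nat) : List Int × List Int :=
  let key := st.1.getD j 0
  let pos := bsearch st.1 key 0 j
  let sc' := st.2 ++ PySem.List.pyRange ((j : Int) - 1) ((pos : Int) - 1) (-1)
  let li1 := st.1.take (pos+1) ++ (st.1.drop pos).take (j - pos) ++ st.1.drop (j+1)
  (li1.set pos key, sc')

def InsertionSortCustom_alt (li : List Int) : List Int :=
  ((List.range li.length).foldl bStep (li, [])).2

-- ===== PRECONDITION & SPEC =====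
def Spec_InsertionSortCustom (li : List Int) (out : List Int) : Prop := out = InsertionSortCustom_alt li
instance (li : List Int) (out : List Int) : Decidable (Spec_InsertionSortCustom li out) := by unfold Spec_InsertionSortCustom; infer_instance

-- ===== CLAIM (what is proved, stated in full; the proofs are below) =====
def Claim_equal_InsertionSortCustom : Prop := ∀ (li : List Int), Dom_InsertionSortCustom li → Spec_InsertionSortCustom li (InsertionSortCustom li)

-- ===== LEMMAS AND PROOFS =====

-- the insertion point: first index of li.take j whose element exceeds key (j if none)
def posOf (li : List Int) (key : Int) (j : Nat) : Nat :=
  (li.take j).findIdx (fun x => decide (key < x))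

theorem posOf_le (li : List Int) (key : Int) (j : Nat) (hj : j ≤ li.length) :
    posOf li key j ≤ j := by
  have h := List.findIdx_le_length (p := fun x => decide (key < x)) (xs := li.take j)
  simpa [posOf, List.length_take, Nat.min_eq_left hj] using h

theorem posOf_lt_le (li : List Int) (key : Int) (j : Nat) (hj : j ≤ li.length)
    {k : Nat} (hk : k < posOf li key j) : li.getD k 0 ≤ key := by
  have hkj : k < j := lt_of_lt_of_le hk (posOf_le li key j hj)
  have hklen : k < li.length := lt_of_lt_of_le hkj hj
  have h := List.not_of_lt_findIdx (p := fun x => decide (key < x)) (xs := li.take j) hk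
  rw [List.getElem_take] at h
  simp only [decide_eq_false_iff_not, not_lt] at h
  rw [List.getD_eq_getElem li 0 hklen]
  exact h

theorem posOf_gt (li : List Int) (key : Int) (j : Nat) (hj : j ≤ li.length)
    (h : posOf li key j < j) : key < li.getD (posOf li key j) 0 := by
  have hlen : posOf li key j < (li.take j).length := by
    rw [List.length_take]; omega
  have hg := List.findIdx_getElem (p := fun x => decide (key < x)) (xs := li.take j)
    (w := hlen)
  rw [List.getElem_take] at hg
  simp only [decide_eq_true_eq] at hg
  have hl : posOf li key j < li.length := lt_of_lt_of_le h hj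
  rw [List.getD_eq_getElem li 0 hl]
  exact hg

-- on a sorted j-prefix, everything from the insertion point on exceeds key
theorem posOf_upper (li : List Int) (key : Int) (j : Nat) (hj : j ≤ li.length)
    (hs : (li.take j).Pairwise (· ≤ ·)) :
    ∀ k, posOf li key j ≤ k → k < j → key < li.getD k 0 := by
  intro k hk1 hk2
  rcases Nat.eq_or_lt_of_le hk1 with h | h
  · rw [← h]; exact posOf_gt li key j hj (by omega)
  · refine lt_of_lt_of_le (posOf_gt li key j hj (by omega)) ?_
    rw [List.getD_eq_getElem li 0 (by omega), List.getD_eq_getElem li 0 (by omega)]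
    have := (List.pairwise_iff_getElem.mp hs) (posOf li key j) k
      (by rw [List.length_take]; omega) (by rw [List.length_take]; omega) h
    simpa [List.getElem_take] using this

theorem bsearch_eq_aux (li : List Int) (key : Int) (pos : Nat) :
    ∀ (d lo hi : Nat), hi - lo ≤ d → lo ≤ pos → pos ≤ hi →
    (∀ k, lo ≤ k → k < pos → li.getD k 0 ≤ key) →
    (∀ k, pos ≤ k → k < hi → key < li.getD k 0) →
    bsearch li key lo hi = pos := by
  intro d
  induction d with
  | zero =>
    intro lo hi hd h1 h2 h3 h4
    rw [bsearch, dif_neg (by omega)]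
    omega
  | succ d ih =>
    intro lo hi hd h1 h2 h3 h4
    rw [bsearch]
    by_cases hlt : lo < hi
    · rw [dif_pos hlt]
      by_cases hc : key < li.getD ((lo + hi) / 2) 0
      · rw [if_pos hc]
        have hple : pos ≤ (lo + hi) / 2 := by
          by_contra hcon
          exact absurd hc (not_lt.mpr (h3 _ (by omega) (by omega)))
        exact ih lo ((lo + hi) / 2) (by omega) h1 hple h3
          (fun k hk1 hk2 => h4 k hk1 (by omega))
      · rw [if_neg hc]
        have hple : (lo + hi) / 2 < pos := by
          by_contra hcon
          exact hc (h4 _ (by omega) (by omega))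
        exact ih ((lo + hi) / 2 + 1) hi (by omega) (by omega) h2
          (fun k hk1 hk2 => h3 k (by omega) hk2) h4
    · rw [dif_neg hlt]
      omega

theorem bsearch_eq (li : List Int) (key : Int) (pos lo hi : Nat) (h1 : lo ≤ pos)
    (h2 : pos ≤ hi)
    (h3 : ∀ k, lo ≤ k → k < pos → li.getD k 0 ≤ key)
    (h4 : ∀ k, pos ≤ k → k < hi → key < li.getD k 0) :
    bsearch li key lo hi = pos :=
  bsearch_eq_aux li key pos (hi - lo) lo hi le_rfl h1 h2 h3 h4

theorem getD_set_ne (l : List Int) (a : Int) (i k : Nat) (h : i ≠ k) :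
    (l.set i a).getD k 0 = l.getD k 0 := by
  rw [List.getD_eq_getElem?_getD, List.getD_eq_getElem?_getD, List.getElem?_set_ne h]

-- pushing one `li[i] = li[i-1]` write through the three-slice decomposition
theorem shift_step (li : List Int) (pos n : Nat) (hp : pos ≤ n) (hn : n + 1 < li.length) :
    (li.set (n+1) (li.getD n 0)).take (pos+1) ++
      ((li.set (n+1) (li.getD n 0)).drop pos).take (n - pos) ++
      (li.set (n+1) (li.getD n 0)).drop (n+1)
    = li.take (pos+1) ++ (li.drop pos).take (n+1 - pos) ++ li.drop (n+2) := by
  have hnlen : n < li.length := by omega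
  have hx : li.getD n 0 = li[n] := List.getD_eq_getElem li 0 hnlen
  have h1 : (li.set (n+1) (li.getD n 0)).take (pos+1) = li.take (pos+1) := by
    rw [List.take_set, List.set_eq_of_length_le]
    rw [List.length_take]; omega
  have h2 : ((li.set (n+1) (li.getD n 0)).drop pos).take (n - pos)
      = (li.drop pos).take (n - pos) := by
    rw [List.drop_set, if_neg (by omega), List.take_set, List.set_eq_of_length_le]
    rw [List.length_take, List.length_drop]; omega
  have h3 : (li.set (n+1) (li.getD n 0)).drop (n+1) = li[n] :: li.drop (n+2) := by
    rw [List.drop_set, if_neg (by omega), Nat.sub_self]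
    rw [List.drop_eq_getElem_cons hn]
    rw [List.set_cons_zero, hx]
  have h4 : (li.drop pos).take (n + 1 - pos) = (li.drop pos).take (n - pos) ++ [li[n]] := by
    have he : n + 1 - pos = (n - pos) + 1 := by omega
    rw [he, List.take_add_one, List.getElem?_drop]
    have he2 : pos + (n - pos) = n := by omega
    rw [he2, List.getElem?_eq_getElem hnlen]
    rfl
  rw [h1, h2, h3, h4]
  simp [List.append_assoc]

-- A's inner while loop, characterised: it walks from i down to pos, producing exactly
-- B's three-slice shifted list and the descending index block.
theorem aWhile_eq (key : Int) (pos : Nat) :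
    ∀ (i : Nat) (li sc : List Int), pos ≤ i → i < li.length →
    (∀ k, pos ≤ k → k < i → key < li.getD k 0) →
    ¬ (1 ≤ pos ∧ key < li.getD (pos - 1) 0) →
    aWhile li sc key i =
      (li.take (pos+1) ++ (li.drop pos).take (i - pos) ++ li.drop (i+1),
       sc ++ PySem.List.pyRange ((i : Int) - 1) ((pos : Int) - 1) (-1), pos) := by
  intro i
  induction i with
  | zero =>
    intro li sc h1 h2 h3 h4
    have hpos : pos = 0 := by omega
    subst hpos
    rw [aWhile, dif_neg (by omega)]
    rw [PySem.List.pyRange_neg_one_eq_nil le_rfl]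
    simp only [Nat.sub_self, List.take_zero, List.drop_zero, List.append_nil]
    rw [List.take_append_drop]
  | succ n ih =>
    intro li sc h1 h2 h3 h4
    by_cases hstop : pos = n + 1
    · subst hstop
      rw [aWhile, dif_neg (by simpa using h4)]
      rw [PySem.List.pyRange_neg_one_eq_nil le_rfl]
      simp only [Nat.sub_self, List.take_zero, List.append_nil]
      rw [List.take_append_drop]
    · have hpn : pos ≤ n := by omega
      have hguard : 1 ≤ n + 1 ∧ key < li.getD ((n+1) - 1) 0 :=
        ⟨by omega, by simpa using h3 n hpn (by omega)⟩
      rw [aWhile, dif_pos hguard]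
      simp only [Nat.add_sub_cancel]
      have hlen' : n < (li.set (n+1) (li.getD n 0)).length := by
        rw [List.length_set]; omega
      have h3' : ∀ k, pos ≤ k → k < n →
          key < (li.set (n+1) (li.getD n 0)).getD k 0 := by
        intro k hk1 hk2
        rw [getD_set_ne _ _ _ _ (by omega)]
        exact h3 k hk1 (by omega)
      have h4' : ¬ (1 ≤ pos ∧ key < (li.set (n+1) (li.getD n 0)).getD (pos-1) 0) := by
        rw [getD_set_ne _ _ _ _ (by omega)]
        exact h4
      rw [ih _ _ hpn hlen' h3' h4']
      have hrange : ((n+1 : Nat) : Int) - 1 = (n : Int) := by push_cast; ring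
      refine Prod.ext ?_ (Prod.ext ?_ rfl)
      · show (li.set (n+1) (li.getD n 0)).take (pos+1) ++
            ((li.set (n+1) (li.getD n 0)).drop pos).take (n - pos) ++
            (li.set (n+1) (li.getD n 0)).drop (n+1)
          = li.take (pos+1) ++ (li.drop pos).take ((n+1) - pos) ++ li.drop ((n+1)+1)
        exact shift_step li pos n hpn h2
      · show sc ++ [((n+1 : Nat) : Int) - 1] ++ PySem.List.pyRange ((n : Int) - 1) ((pos : Int) - 1) (-1)
          = sc ++ PySem.List.pyRange (((n+1 : Nat) : Int) - 1) ((pos : Int) - 1) (-1)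
        rw [hrange, List.append_assoc, List.singleton_append]
        rw [← PySem.List.pyRange_neg_one_cons (show ((pos : Int) - 1) < (n : Int) by omega)]

-- the two loop bodies agree on a state whose first j entries are sorted
theorem step_eq (li sc : List Int) (j : Nat) (hj : j < li.length)
    (hs : (li.take j).Pairwise (· ≤ ·)) :
    aStep (li, sc) j = bStep (li, sc) j := by
  have hjle : j ≤ li.length := le_of_lt hj
  set key := li.getD j 0 with hkey
  set pos := posOf li key j with hpos
  have hple : pos ≤ j := posOf_le li key j hjle
  have hU : ∀ k, pos ≤ k → k < j → key < li.getD k 0 := posOf_upper li key j hjle hs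
  have hL : ∀ k, 0 ≤ k → k < pos → li.getD k 0 ≤ key := by
    intro k _ hk
    exact posOf_lt_le li key j hjle hk
  have hB : bsearch li key 0 j = pos :=
    bsearch_eq li key pos 0 j (Nat.zero_le _) hple hL hU
  have hA : aWhile li sc key j =
      (li.take (pos+1) ++ (li.drop pos).take (j - pos) ++ li.drop (j+1),
       sc ++ PySem.List.pyRange ((j : Int) - 1) ((pos : Int) - 1) (-1), pos) := by
    apply aWhile_eq key pos j li sc hple hj hU
    rintro ⟨hp1, hp2⟩
    exact absurd hp2 (not_lt.mpr (hL (pos - 1) (Nat.zero_le _) (by omega)))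
  simp only [aStep, bStep, ← hkey, hA, hB]

-- the written-back list, re-expressed as prefix ++ key ++ rest
theorem shiftSet_eq (l : List Int) (key : Int) (pos n : Nat) (hp : pos ≤ n) (hn : n < l.length) :
    (l.take (pos+1) ++ (l.drop pos).take (n - pos) ++ l.drop (n+1)).set pos key
    = l.take pos ++ key :: ((l.drop pos).take (n - pos) ++ l.drop (n+1)) := by
  have hlen1 : (l.take (pos+1)).length = pos + 1 := by
    rw [List.length_take]; omega
  rw [List.append_assoc, List.set_append, if_pos (by rw [hlen1]; omega)]
  have hset : (l.take (pos+1)).set pos key = l.take pos ++ [key] := by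
    rw [List.take_add_one, List.getElem?_eq_getElem (show pos < l.length by omega)]
    rw [List.set_append, if_neg (by rw [List.length_take]; omega)]
    have he : pos - (l.take pos).length = 0 := by rw [List.length_take]; omega
    rw [he]
    rfl
  rw [hset]
  simp [List.append_assoc]

-- inserting key at its insertion point keeps the (n+1)-prefix sorted
theorem sorted_insert (l : List Int) (key : Int) (pos n : Nat) (hp : pos ≤ n)
    (hn : n < l.length)
    (hs : (l.take n).Pairwise (· ≤ ·))
    (hlow : ∀ k, k < pos → l.getD k 0 ≤ key)
    (hhigh : ∀ k, pos ≤ k → k < n → key < l.getD k 0) :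
    ((l.take pos ++ key :: ((l.drop pos).take (n - pos) ++ l.drop (n+1))).take (n+1)).Pairwise
      (· ≤ ·) := by
  have hplen : (l.take pos).length = pos := by rw [List.length_take]; omega
  have hMlen : ((l.drop pos).take (n - pos)).length = n - pos := by
    rw [List.length_take, List.length_drop]; omega
  have htake : (l.take pos ++ key :: ((l.drop pos).take (n - pos) ++ l.drop (n+1))).take (n+1)
      = l.take pos ++ key :: (l.drop pos).take (n - pos) := by
    rw [List.take_append,
      List.take_of_length_le (i := n+1) (l := l.take pos) (by rw [hplen]; omega), hplen]
    have he : n + 1 - pos = (n - pos) + 1 := by omega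
    rw [he, List.take_succ_cons]
    rw [List.take_append,
      List.take_of_length_le (i := n - pos) (l := (l.drop pos).take (n - pos))
        (by rw [hMlen]), hMlen]
    rw [Nat.sub_self, List.take_zero, List.append_nil]
  rw [htake]
  have hMk : ∀ b ∈ (l.drop pos).take (n - pos), key < b := by
    intro b hb
    obtain ⟨t, ht, rfl⟩ := List.getElem_of_mem hb
    rw [List.getElem_take, List.getElem_drop]
    have htn : t < n - pos := by rw [hMlen] at ht; exact ht
    have hh := hhigh (pos + t) (by omega) (by omega)
    rwa [List.getD_eq_getElem l 0 (by omega)] at hh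
  rw [List.pairwise_append]
  refine ⟨?_, ?_, ?_⟩
  · have he : l.take pos = (l.take n).take pos := by
      rw [List.take_take, Nat.min_eq_left hp]
    rw [he]
    exact List.Pairwise.sublist (List.take_sublist _ _) hs
  · rw [List.pairwise_cons]
    refine ⟨fun b hb => le_of_lt (hMk b hb), ?_⟩
    have he : (l.drop pos).take (n - pos) = (l.take n).drop pos := by
      rw [List.drop_take]
    rw [he]
    exact List.Pairwise.sublist (List.drop_sublist _ _) hs
  · intro a ha b hb
    obtain ⟨t, ht, rfl⟩ := List.getElem_of_mem ha
    rw [List.getElem_take]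
    have htp : t < pos := by rw [hplen] at ht; exact ht
    have hak : l[t] ≤ key := by
      have hh := hlow t htp
      rwa [List.getD_eq_getElem l 0 (by omega)] at hh
    rcases List.mem_cons.mp hb with rfl | hbM
    · exact hak
    · exact le_of_lt (lt_of_le_of_lt hak (hMk b hbM))

-- the outer loops stay in lock-step; the common state keeps its length and a sorted prefix
theorem loop_inv (li : List Int) :
    ∀ n, n ≤ li.length →
    (List.range n).foldl aStep (li, []) = (List.range n).foldl bStep (li, []) ∧
    ((List.range n).foldl bStep (li, [])).1.length = li.length ∧
    ((((List.range n).foldl bStep (li, [])).1).take n).Pairwise (· ≤ ·) := by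
  intro n
  induction n with
  | zero => intro _; exact ⟨rfl, rfl, by simp⟩
  | succ n ih =>
    intro h
    obtain ⟨heq, hlen, hsort⟩ := ih (by omega)
    rw [List.range_succ, List.foldl_append, List.foldl_append, heq]
    simp only [List.foldl_cons, List.foldl_nil]
    set st := (List.range n).foldl bStep (li, []) with hst
    have hjlt : n < st.1.length := by rw [hlen]; omega
    have hjle : n ≤ st.1.length := le_of_lt hjlt
    have hstep : aStep st n = bStep st n := by
      have := step_eq st.1 st.2 n hjlt hsort
      simpa using this
    set key := st.1.getD n 0 with hkey
    set pos := posOf st.1 key n with hpos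
    have hple : pos ≤ n := posOf_le st.1 key n hjle
    have hU : ∀ k, pos ≤ k → k < n → key < st.1.getD k 0 := posOf_upper st.1 key n hjle hsort
    have hL : ∀ k, k < pos → st.1.getD k 0 ≤ key := by
      intro k hk
      exact posOf_lt_le st.1 key n hjle hk
    have hB : bsearch st.1 key 0 n = pos :=
      bsearch_eq st.1 key pos 0 n (Nat.zero_le _) hple (fun k _ hk => hL k hk) hU
    have hbval : (bStep st n).1
        = st.1.take pos ++ key :: ((st.1.drop pos).take (n - pos) ++ st.1.drop (n+1)) := by
      show ((st.1.take (bsearch st.1 (st.1.getD n 0) 0 n + 1) ++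
          (st.1.drop (bsearch st.1 (st.1.getD n 0) 0 n)).take (n - bsearch st.1 (st.1.getD n 0) 0 n) ++
          st.1.drop (n+1)).set (bsearch st.1 (st.1.getD n 0) 0 n) (st.1.getD n 0))
        = _
      rw [← hkey, hB]
      exact shiftSet_eq st.1 key pos n hple hjlt
    refine ⟨by rw [hstep], ?_, ?_⟩
    · rw [hbval]
      simp only [List.length_append, List.length_cons, List.length_take, List.length_drop]
      omega
    · rw [hbval]
      exact sorted_insert st.1 key pos n hple hjlt hsort hL hU

-- ===== VERDICT (by name: the statement is the Claim_ definition above) =====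
theorem InsertionSortCustom_spec : Claim_equal_InsertionSortCustom := by
  intro li _
  unfold Spec_InsertionSortCustom InsertionSortCustom InsertionSortCustom_alt
  rw [(loop_inv li li.length le_rfl).1]
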